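-- pv_equiv track=rewrite | github.com/cebdast/SEGIF-CARUARU | pipeline-dados/scripts/Empenhos Liquidados.py | trim_bottom_empty_rows_fast
-- ===== SOURCE A (Python) =====
-- def trim_bottom_empty_rows_fast(matrix):
--     """Optimized empty row trimming"""
--     if not matrix:
--         return matrix
--
--     # Find last non-empty row
--     last_row = len(matrix) - 1
--     while last_row > 0:
--         row = matrix[last_row]
--         if any(v not in (None, "") and str(v).strip() for v in row):
--             break
--         last_row -= 1
--
--     return matrix[:last_row + 1]
-- ===== SOURCE B (Python) =====
-- def trim_bottom_empty_rows_fast(matrix):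
--     """Forward single pass: remember the index of the last non-empty row."""
--     if not matrix:
--         return matrix
--     last = 0
--     for i, row in enumerate(matrix):
--         if any(v not in (None, "") and str(v).strip() for v in row):
--             last = i
--     return matrix[:last + 1]
-- ===== Notes on version B (the rewrite author's own statement) =====
-- stated objective: simpler
-- what changed: Replaces A's backward while-loop with early exit and explicit index bookkeeping by a single forward enumerate pass that just remembers the index of the last non-empty row; the default last=0 naturally yields A's keep-first-row behaviour when all rows are empty.
import Mathlib
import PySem

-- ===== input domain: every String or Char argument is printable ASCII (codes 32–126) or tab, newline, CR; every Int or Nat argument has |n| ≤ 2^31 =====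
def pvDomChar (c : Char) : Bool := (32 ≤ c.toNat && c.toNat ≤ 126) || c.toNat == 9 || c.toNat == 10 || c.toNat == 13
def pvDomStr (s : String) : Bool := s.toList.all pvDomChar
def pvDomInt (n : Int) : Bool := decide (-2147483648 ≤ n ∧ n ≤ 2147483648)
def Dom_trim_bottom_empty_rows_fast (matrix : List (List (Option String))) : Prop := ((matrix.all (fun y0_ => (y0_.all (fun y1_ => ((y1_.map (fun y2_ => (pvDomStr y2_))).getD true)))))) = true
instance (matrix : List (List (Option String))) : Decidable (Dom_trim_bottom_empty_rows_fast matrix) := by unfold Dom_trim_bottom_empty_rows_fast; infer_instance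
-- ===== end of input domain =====

-- B replaces A's backward early-exit scan by a forward single pass remembering the last non-empty row index (objective: simpler).

-- ===== PORT A =====
-- the generator-expression test 'any(v not in (None, "") and str(v).strip() for v in row)'
def pvRowNonempty (row : List (Option String)) : Bool :=
  row.any fun v => match v with
    | none => false
    | some s => !(s == "") && !(PySem.Str.strip s == "")

-- A's 'while last_row > 0: ... last_row -= 1' countdown; matrix[last_row] is always in
-- range (last_row starts at len-1 and only decreases while > 0), so getD is exact here.
def pvLastRowLoop (matrix : List (List (Option String))) : Nat → Nat
  | 0 => 0
  | k+1 => if pvRowNonempty (matrix.getD (k+1) []) then k+1 else pvLastRowLoop matrix k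

def trim_bottom_empty_rows_fast (matrix : List (List (Option String))) : List (List (Option String)) :=
  if matrix.isEmpty then matrix
  else
    -- matrix[:last_row+1] with 0 ≤ last_row+1, i.e. a take
    matrix.take (pvLastRowLoop matrix (matrix.length - 1) + 1)

-- ===== PORT B =====
def trim_bottom_empty_rows_fast_alt (matrix : List (List (Option String))) : List (List (Option String)) :=
  if matrix.isEmpty then matrix
  else
    let last := (PySem.List.enumerate matrix).foldl
      (fun acc p => if pvRowNonempty p.2 then p.1 else acc) (0 : Int)
    PySem.List.slice matrix none (some (last + 1))

-- ===== PRECONDITION & SPEC =====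
def Spec_trim_bottom_empty_rows_fast (matrix : List (List (Option String))) (out : List (List (Option String))) : Prop := out = trim_bottom_empty_rows_fast_alt matrix
instance (matrix : List (List (Option String))) (out : List (List (Option String))) : Decidable (Spec_trim_bottom_empty_rows_fast matrix out) := by unfold Spec_trim_bottom_empty_rows_fast; infer_instance

-- ===== CLAIM (what is proved, stated in full; the proofs are below) =====
def Claim_equal_trim_bottom_empty_rows_fast : Prop := ∀ (matrix : List (List (Option String))), Dom_trim_bottom_empty_rows_fast matrix → Spec_trim_bottom_empty_rows_fast matrix (trim_bottom_empty_rows_fast matrix)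

-- ===== LEMMAS AND PROOFS =====

-- B's forward fold over the first k+1 rows computes exactly A's countdown result for bound k.
lemma pvFold_take_eq (matrix : List (List (Option String))) (hne : matrix ≠ []) :
    ∀ k, k < matrix.length →
      (PySem.List.enumerate (matrix.take (k+1))).foldl
        (fun acc p => if pvRowNonempty p.2 then p.1 else acc) (0 : Int)
      = ((pvLastRowLoop matrix k : Nat) : Int) := by
  intro k
  induction k with
  | zero =>
    intro hk
    cases matrix with
    | nil => exact absurd rfl hne
    | cons r rs =>
      simp [PySem.List.enumerate_cons, PySem.List.enumerate_nil, pvLastRowLoop]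
  | succ k ih =>
    intro hk
    have hk' : k < matrix.length := Nat.lt_of_succ_lt hk
    have htake : matrix.take (k+2) = matrix.take (k+1) ++ [matrix[k+1]] := by
      rw [List.take_add_one]
      simp [List.getElem?_eq_getElem hk]
    have hlen : (matrix.take (k+1)).length = k+1 := List.length_take_of_le (by omega)
    rw [htake, PySem.List.enumerate_append, List.foldl_append, hlen]
    simp only [PySem.List.enumerate_cons, PySem.List.enumerate_nil, List.foldl_cons, List.foldl_nil]
    have hget : matrix.getD (k+1) [] = matrix[k+1] := List.getD_eq_getElem matrix [] hk
    rw [ih hk']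
    simp only [pvLastRowLoop, hget]
    split <;> push_cast <;> ring

-- ===== VERDICT (by name: the statement is the Claim_ definition above) =====
theorem trim_bottom_empty_rows_fast_spec : Claim_equal_trim_bottom_empty_rows_fast := by
  unfold Claim_equal_trim_bottom_empty_rows_fast
  intro matrix _
  unfold Spec_trim_bottom_empty_rows_fast
  unfold trim_bottom_empty_rows_fast trim_bottom_empty_rows_fast_alt
  by_cases hne : matrix.isEmpty
  · simp [hne]
  · simp only [hne, if_neg, Bool.false_eq_true, not_false_eq_true]
    have hne' : matrix ≠ [] := by simpa [List.isEmpty_iff] using hne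
    have hlen : 0 < matrix.length := List.length_pos_of_ne_nil hne'
    have h1 : matrix.length - 1 < matrix.length := by omega
    have htake : matrix.take (matrix.length - 1 + 1) = matrix := by
      rw [show matrix.length - 1 + 1 = matrix.length from by omega]
      exact List.take_length
    have := pvFold_take_eq matrix hne' (matrix.length - 1) h1
    rw [htake] at this
    rw [this]
    have : ((pvLastRowLoop matrix (matrix.length - 1) : Nat) : Int) + 1
         = ((pvLastRowLoop matrix (matrix.length - 1) + 1 : Nat) : Int) := by push_cast; ring
    rw [this, PySem.List.slice_to_natCast]
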